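-- pv_equiv track=rewrite | github.com/luisalandert/AFN | teste.py | get_state_transition
-- ===== SOURCE A (Python) =====
-- def get_state_transition(transitions_list, state, symbols):
--     resulting_states = []
--     for symbol in symbols:
--         temp = []
--         for i in transitions_list:
--             if (i[0] == state) and (i[1] == symbol):
--                 temp.append(str(i[2]))
--         if not temp:
--             resulting_states.append(['-1'])
--         else:
--             resulting_states.append(temp)
--     return resulting_states
-- ===== SOURCE B (Python) =====
-- def get_state_transition(transitions_list, state, symbols):
--     buckets = {}
--     for t in transitions_list:
--         if t[0] == state:
--             buckets.setdefault(t[1], []).append(str(t[2]))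
--     return [buckets.get(sym) or ['-1'] for sym in symbols]
-- ===== Notes on version B (the rewrite author's own statement) =====
-- stated objective: faster
-- what changed: Instead of rescanning the whole transition list once per symbol, B groups targets by symbol in a single pass over transitions (a dict of buckets) and then answers each symbol by one lookup.
import Mathlib
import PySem

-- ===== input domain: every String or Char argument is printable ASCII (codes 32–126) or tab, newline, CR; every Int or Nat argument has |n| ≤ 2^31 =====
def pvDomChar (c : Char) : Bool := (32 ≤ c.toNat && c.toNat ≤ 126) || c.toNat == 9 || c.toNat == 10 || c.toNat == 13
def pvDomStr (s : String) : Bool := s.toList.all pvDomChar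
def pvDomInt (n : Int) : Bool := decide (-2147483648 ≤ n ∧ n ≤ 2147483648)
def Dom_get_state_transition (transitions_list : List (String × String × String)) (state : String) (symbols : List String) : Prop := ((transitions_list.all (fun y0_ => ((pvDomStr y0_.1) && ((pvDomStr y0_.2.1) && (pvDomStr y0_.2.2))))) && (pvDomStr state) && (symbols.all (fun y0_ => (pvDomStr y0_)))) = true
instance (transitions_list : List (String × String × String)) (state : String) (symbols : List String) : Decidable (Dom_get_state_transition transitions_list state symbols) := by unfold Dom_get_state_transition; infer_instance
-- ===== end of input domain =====

-- B replaces A's per-symbol rescans of the transition list with a single grouping pass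
-- over transitions (symbol -> bucket of targets) followed by one dict lookup per symbol: faster.

-- ===== PORT A =====
def get_state_transition (transitions_list : List (String × String × String)) (state : String) (symbols : List String) : List (List String) :=
  symbols.foldl (fun resulting_states symbol =>
    let temp := transitions_list.foldl (fun temp i =>
      if i.1 == state && i.2.1 == symbol then temp ++ [i.2.2] else temp) []
    if temp = [] then resulting_states ++ [["-1"]] else resulting_states ++ [temp]) []

-- ===== PORT B =====
def pvBuckets (transitions_list : List (String × String × String)) (state : String) :
    PySem.Dict String (List String) :=
  transitions_list.foldl (fun d t =>
    if t.1 == state then d.modify t.2.1 [] (· ++ [t.2.2]) else d) PySem.Dict.empty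

def get_state_transition_alt (transitions_list : List (String × String × String)) (state : String) (symbols : List String) : List (List String) :=
  let buckets := pvBuckets transitions_list state
  symbols.map (fun sym =>
    match buckets.get? sym with          -- buckets.get(sym) or ['-1']
    | none => ["-1"]
    | some l => if l = [] then ["-1"] else l)

-- ===== PRECONDITION & SPEC =====
def Spec_get_state_transition (transitions_list : List (String × String × String)) (state : String) (symbols : List String) (out : List (List String)) : Prop := out = get_state_transition_alt transitions_list state symbols
instance (transitions_list : List (String × String × String)) (state : String) (symbols : List String) (out : List (List String)) : Decidable (Spec_get_state_transition transitions_list state symbols out) := by unfold Spec_get_state_transition; infer_instance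

-- ===== CLAIM (what is proved, stated in full; the proofs are below) =====
def Claim_equal_get_state_transition : Prop := ∀ (transitions_list : List (String × String × String)) (state : String) (symbols : List String), Dom_get_state_transition transitions_list state symbols → Spec_get_state_transition transitions_list state symbols (get_state_transition transitions_list state symbols)

-- ===== LEMMAS AND PROOFS =====

-- the bucket a symbol ends up with equals A's inner scan (generalized over the starting dict)
theorem pvBuckets_getD (transitions_list : List (String × String × String)) (state : String)
    (sym : String) (d : PySem.Dict String (List String)) :
    (transitions_list.foldl (fun d t =>
        if t.1 == state then d.modify t.2.1 [] (· ++ [t.2.2]) else d) d).getD sym []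
      = transitions_list.foldl (fun temp i =>
          if i.1 == state && i.2.1 == sym then temp ++ [i.2.2] else temp) (d.getD sym []) := by
  induction transitions_list generalizing d with
  | nil => rfl
  | cons t ts ih =>
    simp only [List.foldl_cons]
    cases h1 : (t.1 == state) with
    | false =>
      rw [if_neg (fun hh => by simp at hh), ih]
      simp
    | true =>
      rw [if_pos rfl, ih]
      congr 1
      by_cases h2 : t.2.1 = sym
      · rw [PySem.Dict.getD_modify, if_pos h2.symm, if_pos (by simp [h2]), h2]
      · rw [PySem.Dict.getD_modify, if_neg (fun hh => h2 hh.symm),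
            if_neg (by simp [h2])]

theorem get_state_transition_eq (transitions_list : List (String × String × String))
    (state : String) (symbols : List String) :
    get_state_transition transitions_list state symbols
      = get_state_transition_alt transitions_list state symbols := by
  unfold get_state_transition get_state_transition_alt
  have hfold : ∀ (acc : List (List String)),
      symbols.foldl (fun resulting_states symbol =>
        let temp := transitions_list.foldl (fun temp i =>
          if i.1 == state && i.2.1 == symbol then temp ++ [i.2.2] else temp) []
        if temp = [] then resulting_states ++ [["-1"]] else resulting_states ++ [temp]) acc
      = acc ++ symbols.map (fun symbol =>
          let temp := transitions_list.foldl (fun temp i =>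
            if i.1 == state && i.2.1 == symbol then temp ++ [i.2.2] else temp) []
          if temp = [] then ["-1"] else temp) := by
    intro acc
    induction symbols generalizing acc with
    | nil => simp
    | cons s ss ih =>
      simp only [List.foldl_cons, List.map_cons]
      rw [ih]
      by_cases h : (transitions_list.foldl (fun temp i =>
          if i.1 == state && i.2.1 == s then temp ++ [i.2.2] else temp) []) = []
      · rw [if_pos h, if_pos h, List.append_assoc, List.singleton_append]
      · rw [if_neg h, if_neg h, List.append_assoc, List.singleton_append]
  rw [hfold, List.nil_append]
  apply List.map_congr_left
  intro sym _
  simp only [pvBuckets]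
  have hb := pvBuckets_getD transitions_list state sym PySem.Dict.empty
  rw [PySem.Dict.getD_empty, PySem.Dict.getD_eq_get?_getD] at hb
  cases hg : (transitions_list.foldl (fun d t =>
      if t.1 == state then d.modify t.2.1 [] (· ++ [t.2.2]) else d) PySem.Dict.empty).get? sym with
  | none =>
    rw [hg, Option.getD_none] at hb
    rw [if_pos hb.symm]
  | some l =>
    rw [hg, Option.getD_some] at hb
    rw [← hb]

-- ===== VERDICT (by name: the statement is the Claim_ definition above) =====
theorem get_state_transition_spec : Claim_equal_get_state_transition := by
  intro ts st syms _
  unfold Spec_get_state_transition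
  exact get_state_transition_eq ts st syms
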